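-- pv_equiv track=rewrite | github.com/mcandiri/sqlforensic | src/sqlforensic/parsers/sp_parser.py | _calculate_subquery_depth
-- ===== SOURCE A (Python) =====
-- def _calculate_subquery_depth(body: str) -> int:
--     """Calculate maximum nesting depth of subqueries."""
--     max_depth = 0
--     current_depth = 0
--     upper = body.upper()
--     i = 0
--     while i < len(upper):
--         if upper[i] == "(":
--             # Skip whitespace after opening paren to find SELECT
--             j = i + 1
--             while j < len(upper) and upper[j] in " \t\r\n":
--                 j += 1
--             if upper[j : j + 6] == "SELECT":
--                 current_depth += 1
--                 max_depth = max(max_depth, current_depth)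
--         elif upper[i] == ")":
--             if current_depth > 0:
--                 current_depth -= 1
--         i += 1
--     return max_depth
-- ===== SOURCE B (Python) =====
-- def _calculate_subquery_depth(body: str) -> int:
--     """Two-phase: extract an ordered +1/-1 event stream (open-SELECT parens and
--     closing parens), then reduce it with a clamped-at-zero running depth."""
--     upper = body.upper()
--     events = []
--     for i, ch in enumerate(upper):
--         if ch == "(":
--             if upper[i + 1:].lstrip(" \t\r\n").startswith("SELECT"):
--                 events.append(1)
--         elif ch == ")":
--             events.append(-1)
--     depth = max_depth = 0
--     for e in events:
--         depth = max(depth + e, 0)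
--         max_depth = max(max_depth, depth)
--     return max_depth
-- ===== Notes on version B (the rewrite author's own statement) =====
-- stated objective: alternative
-- what changed: Replaced A's single indexed while-loop with an inner whitespace-skip loop by a two-phase events-then-reduce decomposition: first extract an ordered +1/-1 event list (open-SELECT parens via lstrip+startswith, and closing parens), then fold it with a clamped-at-zero running depth and running maximum; the per-char work moves from interpreted string indexing to C-level slicing/lstrip/startswith.
import Mathlib
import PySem

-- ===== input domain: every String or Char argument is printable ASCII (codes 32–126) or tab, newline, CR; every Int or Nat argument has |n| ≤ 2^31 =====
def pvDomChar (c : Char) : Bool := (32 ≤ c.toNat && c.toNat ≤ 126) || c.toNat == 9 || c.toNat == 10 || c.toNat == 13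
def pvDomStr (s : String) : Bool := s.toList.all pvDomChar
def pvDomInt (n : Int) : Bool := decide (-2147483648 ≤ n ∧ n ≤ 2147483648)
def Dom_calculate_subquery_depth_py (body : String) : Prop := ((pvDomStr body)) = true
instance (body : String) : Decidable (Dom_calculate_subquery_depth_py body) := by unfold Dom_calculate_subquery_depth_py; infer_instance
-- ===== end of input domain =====

-- B replaces A's single indexed scan (with an inner whitespace-skip loop) by an
-- events-then-reduce decomposition: extract a +1/-1 event list, then fold with a
-- clamped running depth (objective: alternative, same cost).


-- ===== PORT A =====

-- "SELECT" as chars, and the whitespace set " \t\r\n" A skips after '('.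
def pvSel : List Char := ['S','E','L','E','C','T']
def pvWs : List Char := [' ', '\t', '\r', '\n']

-- A's while loop over indices i, on the suffix of upper starting at i;
-- the inner whitespace-skip while + slice `upper[j:j+6]` is exactly
-- dropWhile-then-take-6 on the suffix after the '('.
def pvLoopA : List Char → Int → Int → Int
  | [], maxD, _ => maxD
  | c :: rest, maxD, curD =>
    if c = '(' then
      if (rest.dropWhile (fun x => x ∈ pvWs)).take 6 = pvSel then
        pvLoopA rest (max maxD (curD + 1)) (curD + 1)
      else pvLoopA rest maxD curD
    else if c = ')' then
      if curD > 0 then pvLoopA rest maxD (curD - 1)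
      else pvLoopA rest maxD curD
    else pvLoopA rest maxD curD

def calculate_subquery_depth_py (body : String) : Int :=
  pvLoopA (PySem.Str.upper body).toList 0 0

-- ===== PORT B =====

-- phase 1 of Source B: the ordered +1/-1 event stream ('(SELECT' opens, ')' closes);
-- `upper[i+1:].lstrip(" \t\r\n").startswith("SELECT")` is dropWhile + isPrefixOf.
def pvEventsB : List Char → List Int
  | [] => []
  | c :: rest =>
    if c = '(' then
      (if pvSel.isPrefixOf (rest.dropWhile (fun x => x ∈ pvWs)) then
        1 :: pvEventsB rest
      else pvEventsB rest)
    else if c = ')' then (-1) :: pvEventsB rest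
    else pvEventsB rest

-- phase 2 of Source B: clamped depth fold.
def pvStepB (s : Int × Int) (e : Int) : Int × Int :=
  let d := max (s.1 + e) 0
  (d, max s.2 d)

def calculate_subquery_depth_py_alt (body : String) : Int :=
  ((pvEventsB (PySem.Str.upper body).toList).foldl pvStepB (0, 0)).2

-- ===== PRECONDITION & SPEC =====
def Spec_calculate_subquery_depth_py (body : String) (out : Int) : Prop := out = calculate_subquery_depth_py_alt body
instance (body : String) (out : Int) : Decidable (Spec_calculate_subquery_depth_py body out) := by unfold Spec_calculate_subquery_depth_py; infer_instance

-- ===== CLAIM (what is proved, stated in full; the proofs are below) =====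
def Claim_equal_calculate_subquery_depth_py : Prop := ∀ (body : String), Dom_calculate_subquery_depth_py body → Spec_calculate_subquery_depth_py body (calculate_subquery_depth_py body)

-- ===== LEMMAS AND PROOFS =====

-- startswith on the stripped tail equals A's 6-char-slice comparison.
lemma pvSel_isPrefixOf_iff (xs : List Char) :
    pvSel.isPrefixOf xs = true ↔ xs.take 6 = pvSel := by
  rw [List.isPrefixOf_iff_prefix]
  constructor
  · intro h
    obtain ⟨t, ht⟩ := h
    subst ht
    simp [pvSel]
  · intro h
    rw [← h]
    exact List.take_prefix _ _

-- Loop invariant: A's scan equals B's fold over the event stream, for any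
-- accumulator with 0 ≤ curD ≤ maxD.
lemma pvLoopA_eq_fold (cs : List Char) :
    ∀ (maxD curD : Int), 0 ≤ curD → curD ≤ maxD →
      pvLoopA cs maxD curD = ((pvEventsB cs).foldl pvStepB (curD, maxD)).2 := by
  induction cs with
  | nil => intro maxD curD _ _; simp [pvLoopA, pvEventsB]
  | cons c rest ih =>
    intro maxD curD h0 hle
    by_cases hc : c = '('
    · by_cases hsel : (rest.dropWhile (fun x => x ∈ pvWs)).take 6 = pvSel
      · have hpre : pvSel.isPrefixOf (rest.dropWhile (fun x => x ∈ pvWs)) = true :=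
          (pvSel_isPrefixOf_iff _).mpr hsel
        have hstep : pvStepB (curD, maxD) 1 = (curD + 1, max maxD (curD + 1)) := by
          simp [pvStepB]; omega
        rw [show pvLoopA (c :: rest) maxD curD
              = pvLoopA rest (max maxD (curD + 1)) (curD + 1) by
            simp [pvLoopA, hc, hsel]]
        rw [show pvEventsB (c :: rest) = 1 :: pvEventsB rest by
            simp [pvEventsB, hc, hpre]]
        rw [List.foldl_cons, hstep, ih _ _ (by omega) (by omega)]
      · have hpre : pvSel.isPrefixOf (rest.dropWhile (fun x => x ∈ pvWs)) ≠ true :=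
          fun h => hsel ((pvSel_isPrefixOf_iff _).mp h)
        rw [show pvLoopA (c :: rest) maxD curD = pvLoopA rest maxD curD by
            simp [pvLoopA, hc, hsel]]
        rw [show pvEventsB (c :: rest) = pvEventsB rest by
            simp [pvEventsB, hc, hpre]]
        exact ih _ _ h0 hle
    · by_cases hc2 : c = ')'
      · have hstep : pvStepB (curD, maxD) (-1)
            = (if curD > 0 then curD - 1 else curD, maxD) := by
          simp [pvStepB]
          constructor
          · split_ifs <;> omega
          · omega
        rw [show pvEventsB (c :: rest) = (-1) :: pvEventsB rest by
            simp [pvEventsB, hc2]]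
        rw [List.foldl_cons, hstep]
        by_cases hd : curD > 0
        · rw [show pvLoopA (c :: rest) maxD curD = pvLoopA rest maxD (curD - 1) by
              simp [pvLoopA, hc2, hd]]
          simp only [hd, if_pos]
          exact ih _ _ (by omega) (by omega)
        · rw [show pvLoopA (c :: rest) maxD curD = pvLoopA rest maxD curD by
              simp [pvLoopA, hc2, hd]]
          simp only [hd, if_false]
          exact ih _ _ h0 hle
      · rw [show pvLoopA (c :: rest) maxD curD = pvLoopA rest maxD curD by
            simp [pvLoopA, hc, hc2]]
        rw [show pvEventsB (c :: rest) = pvEventsB rest by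
            simp [pvEventsB, hc, hc2]]
        exact ih _ _ h0 hle

-- ===== VERDICT (by name: the statement is the Claim_ definition above) =====
theorem calculate_subquery_depth_py_spec : Claim_equal_calculate_subquery_depth_py := by
  intro body _
  unfold Spec_calculate_subquery_depth_py calculate_subquery_depth_py calculate_subquery_depth_py_alt
  exact pvLoopA_eq_fold _ 0 0 le_rfl le_rfl
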